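-- pv_equiv track=rewrite | github.com/yannn-0430/SC6104 | Crypto_project/attacker/recover.py | build_symbolic_map
-- ===== SOURCE A (Python) =====
-- def build_symbolic_map(steps):
--     # Represent basis vectors as integers of 128 bits: e0 = 1<<0, e1 = 1<<1, ...
--     # We'll compute for each time step t the mapping from initial state to the output bits (full 128 bits).
--     # Returns list of length = steps, each entry is a list of 128 integers representing columns:
--     maps = []
--     # initialize basis: state = vector of 128 basis vectors -> represented as integer with single bit set
--     basis = [1 << i for i in range(128)]
--     # state as list of 128-bit coefficients for current state words: state_coeffs is length 128 where each element is int mask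
--     state_coeffs = basis[:]  # at time 0, bit i corresponds to basis[i]
--     for step in range(steps):
--         # output is the full state (in oracle). So the mapping from initial bits to output bits is state_coeffs itself.
--         # For convenience, we store mapping as list of 128 ints, where mapping[j] is integer mask (128 bits)
--         maps.append(state_coeffs.copy())
--         # Now advance state: apply linear transform t = s ^ (s<<7) ^ (s>>13) ^ rotl(s,37)
--         # We must compute how each bit of new state depends on initial bits.
--         new_state_coeffs = [0] * 128
--         # For all bits b in 0..127, compute contributions:
--         for i in range(128):
--             # s bit i contributes to:
--             # - s ^ (s<<7): to bit i (s), bit i+7 (from <<7) if i+7<128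
--             # - (s>>13) contributes to bit i-13 if i-13>=0
--             # - rotl(s,37): contributes to bit (i+37)%128
--             # We'll collect coefficients by XORing the corresponding basis masks.
--             mask = 0
--             # original s contributes to bit i
--             mask ^= state_coeffs[i]
--             # s << 7 contributes to bit i+7 (i maps to i+7)
--             j = i + 7
--             if j < 128:
--                 new_state_coeffs[j] ^= state_coeffs[i]
--             else:
--                 # out-of-range simply ignored for << beyond 128 (we masked in oracle)
--                 pass
--             # s >> 13 contributes to bit i-13
--             j2 = i - 13
--             if j2 >= 0:
--                 new_state_coeffs[j2] ^= state_coeffs[i]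
--             # rotl: bit i maps to (i+37) % 128
--             j3 = (i + 37) % 128
--             new_state_coeffs[j3] ^= state_coeffs[i]
--             # and we also had mask (the original s) contribute to bit i:
--             new_state_coeffs[i] ^= state_coeffs[i]
--         # Now new_state_coeffs ready
--         state_coeffs = new_state_coeffs
--     return maps  # maps[step][bit_index] -> integer mask of length 128 indicating which initial bits affect that output bit.
-- ===== SOURCE B (Python) =====
-- def build_symbolic_map(steps):
--     # Gather formulation: precompute transition table T, where T[j] is the sorted
--     # list of source state-bit indices feeding new-state bit j, then each step
--     # computes new[j] by XOR-gathering state_coeffs over T[j].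
--     T = []
--     for j in range(128):
--         srcs = [j]                      # s itself: source j
--         if j >= 7:
--             srcs.append(j - 7)          # s << 7: source j-7
--         if j + 13 < 128:
--             srcs.append(j + 13)         # s >> 13: source j+13
--         srcs.append((j + 91) % 128)     # rotl(s, 37): source (j-37) mod 128
--         T.append(sorted(srcs))
--     state_coeffs = [1 << i for i in range(128)]
--     maps = []
--     for _ in range(steps):
--         maps.append(state_coeffs.copy())
--         new_state_coeffs = []
--         for row in T:
--             acc = 0
--             for i in row:
--                 acc ^= state_coeffs[i]
--             new_state_coeffs.append(acc)
--         state_coeffs = new_state_coeffs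
--     return maps
-- ===== Notes on version B (the rewrite author's own statement) =====
-- stated objective: alternative
-- what changed: Replaces A's inline scatter (each source bit i XORed into its up-to-4 target positions inside the step loop) by a precomputed 128-entry transition table T of source bitmasks plus a gather: new[j] is the XOR of state_coeffs[i] over the set bits i of T[j]; the dead mask variable is dropped.
import Mathlib
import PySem

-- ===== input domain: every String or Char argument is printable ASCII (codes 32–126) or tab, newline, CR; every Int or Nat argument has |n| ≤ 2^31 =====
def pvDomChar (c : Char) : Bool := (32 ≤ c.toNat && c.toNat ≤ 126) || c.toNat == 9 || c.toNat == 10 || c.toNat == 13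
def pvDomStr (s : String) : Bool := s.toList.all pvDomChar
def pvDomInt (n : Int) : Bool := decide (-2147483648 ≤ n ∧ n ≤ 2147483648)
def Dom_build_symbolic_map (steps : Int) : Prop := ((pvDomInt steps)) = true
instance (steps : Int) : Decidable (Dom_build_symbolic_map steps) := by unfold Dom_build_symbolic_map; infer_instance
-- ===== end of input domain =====

-- B replaces A's inline scatter of each state bit into its targets by a precomputed
-- 128-entry transition table and a gather-style XOR per output bit (objective: alternative).

-- ===== PORT A =====
-- a[j] ^= v  (j always in range in A's loop)
def pvScUpd (a : List Int) (j : Nat) (v : Int) : List Int := a.set j (PySem.Int.bxor (a.getD j 0) v)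

-- body of A's inner "for i in range(128)" loop (the dead local `mask` is dropped)
def pvScatterBody (sc : List Int) (new : List Int) (i : Nat) : List Int :=
  let v := sc.getD i 0
  let new := if i + 7 < 128 then pvScUpd new (i + 7) v else new
  let new := if 13 ≤ i then pvScUpd new (i - 13) v else new
  let new := pvScUpd new ((i + 37) % 128) v
  pvScUpd new i v

-- one advance of state_coeffs in A
def pvStepA (sc : List Int) : List Int :=
  (List.range 128).foldl (pvScatterBody sc) (List.replicate 128 0)

def build_symbolic_map (steps : Int) : List (List Int) :=
  let basis : List Int := (List.range 128).map (fun i => ((1 <<< i : Nat) : Int))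
  ((PySem.List.pyRange 0 steps 1).foldl
    (fun (st : List (List Int) × List Int) _ => (st.1 ++ [st.2], pvStepA st.2))
    (([] : List (List Int)), basis)).1

-- ===== PORT B =====
-- B's precomputed transition table: T[j] = sorted source indices feeding bit j
def pvTransT : List (List Int) :=
  (List.range 128).foldl (fun (T : List (List Int)) (j : Nat) =>
    let srcs : List Int := [(j : Int)]
    let srcs := if 7 ≤ j then srcs ++ [((j : Int) - 7)] else srcs
    let srcs := if j + 13 < 128 then srcs ++ [((j : Int) + 13)] else srcs
    let srcs := srcs ++ [Int.ofNat ((j + 91) % 128)]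
    T ++ [PySem.List.sorted srcs (fun x => x) false]) []

-- one advance of state_coeffs in B: gather per output bit j over T[j]
def pvStepB (sc : List Int) : List Int :=
  pvTransT.foldl (fun new row =>
    new ++ [row.foldl (fun acc i => PySem.Int.bxor acc (PySem.List.pyGetD sc i 0)) 0]) []

def build_symbolic_map_alt (steps : Int) : List (List Int) :=
  let basis : List Int := (List.range 128).map (fun i => ((1 <<< i : Nat) : Int))
  ((PySem.List.pyRange 0 steps 1).foldl
    (fun (st : List (List Int) × List Int) _ => (st.1 ++ [st.2], pvStepB st.2))
    (([] : List (List Int)), basis)).1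

-- ===== PRECONDITION & SPEC =====
def Spec_build_symbolic_map (steps : Int) (out : List (List Int)) : Prop := out = build_symbolic_map_alt steps
instance (steps : Int) (out : List (List Int)) : Decidable (Spec_build_symbolic_map steps out) := by unfold Spec_build_symbolic_map; infer_instance

-- ===== CLAIM (what is proved, stated in full; the proofs are below) =====
def Claim_equal_build_symbolic_map : Prop := ∀ (steps : Int), Dom_build_symbolic_map steps → Spec_build_symbolic_map steps (build_symbolic_map steps)

-- ===== LEMMAS AND PROOFS =====

-- target positions of source bit i in A's scatter, in update order
def pvTargets (i : Nat) : List Nat :=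
  (if i + 7 < 128 then [i + 7] else []) ++ (if 13 ≤ i then [i - 13] else []) ++ [(i + 37) % 128, i]

theorem pvScUpd_length (a : List Int) (k : Nat) (v : Int) : (pvScUpd a k v).length = a.length := by
  simp [pvScUpd]

theorem pvScUpd_getD (a : List Int) (k : Nat) (v : Int) (j : Nat) :
    (pvScUpd a k v).getD j 0 = if j = k ∧ k < a.length then PySem.Int.bxor (a.getD j 0) v else a.getD j 0 := by
  simp only [pvScUpd, List.getD_eq_getElem?_getD, List.getElem?_set]
  split_ifs with h1 h2 h3 h4 h5 <;> simp_all

theorem pvScatterBody_length (sc a : List Int) (i : Nat) :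
    (pvScatterBody sc a i).length = a.length := by
  simp only [pvScatterBody]
  split_ifs <;> simp [pvScUpd_length]

theorem pvScatterBody_getD (sc a : List Int) (i j : Nat) (ha : a.length = 128) (hj : j < 128) :
    (pvScatterBody sc a i).getD j 0 =
      if j ∈ pvTargets i then PySem.Int.bxor (a.getD j 0) (sc.getD i 0) else a.getD j 0 := by
  unfold pvScatterBody pvTargets
  by_cases h7 : i + 7 < 128 <;> by_cases h13 : 13 ≤ i <;>
    simp only [h7, h13, if_true, if_false] <;>
    simp only [pvScUpd_getD, pvScUpd_length, ha, List.mem_append, List.mem_cons,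
      List.not_mem_nil, or_false, false_or] <;>
    split_ifs <;> first | rfl | omega

theorem pvScatter_fold (sc : List Int) (I : List Nat) :
    ∀ (a : List Int), a.length = 128 → ∀ j, j < 128 →
    (I.foldl (pvScatterBody sc) a).getD j 0 =
      (I.filter (fun i => decide (j ∈ pvTargets i))).foldl (fun acc i => PySem.Int.bxor acc (sc.getD i 0)) (a.getD j 0) := by
  induction I with
  | nil => intro a _ j _; simp
  | cons i I ih =>
    intro a ha j hj
    have hlen : (pvScatterBody sc a i).length = 128 := by rw [pvScatterBody_length, ha]
    simp only [List.foldl_cons, List.filter_cons]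
    by_cases hmem : j ∈ pvTargets i
    · simp only [hmem, decide_true, if_true, List.foldl_cons]
      rw [ih _ hlen j hj, pvScatterBody_getD sc a i j ha hj, if_pos hmem]
    · simp only [hmem, decide_false, Bool.false_eq_true, if_false]
      rw [ih _ hlen j hj, pvScatterBody_getD sc a i j ha hj, if_neg hmem]

theorem pvStepA_length (sc : List Int) : (pvStepA sc).length = 128 := by
  unfold pvStepA
  have : ∀ (I : List Nat) (a : List Int), (I.foldl (pvScatterBody sc) a).length = a.length := by
    intro I
    induction I with
    | nil => intro a; rfl
    | cons i I ih => intro a; simp [List.foldl_cons, ih, pvScatterBody_length]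
  simp [this]

theorem pvStepA_getD (sc : List Int) (j : Nat) (hj : j < 128) :
    (pvStepA sc).getD j 0 =
      ((List.range 128).filter (fun i => decide (j ∈ pvTargets i))).foldl
        (fun acc i => PySem.Int.bxor acc (sc.getD i 0)) 0 := by
  unfold pvStepA
  rw [pvScatter_fold sc (List.range 128) (List.replicate 128 0) (by simp) j hj]
  have h0 : (List.replicate 128 (0 : Int)).getD j 0 = 0 := by
    rw [List.getD_eq_getElem?_getD, List.getElem?_replicate]
    simp [hj]
  rw [h0]

theorem pvStepB_eq_map (sc : List Int) :
    pvStepB sc = pvTransT.map (fun row =>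
      row.foldl (fun acc i => PySem.Int.bxor acc (PySem.List.pyGetD sc i 0)) 0) := by
  unfold pvStepB
  rw [PySem.List.foldl_append_singleton_eq_map]
  simp

set_option maxRecDepth 100000 in
theorem pvFilters_eq : ∀ j ∈ List.range 128,
    ((List.range 128).filter (fun i => decide (j ∈ pvTargets i))).map (fun i => Int.ofNat i) =
      pvTransT.getD j [] := by
  decide

set_option maxRecDepth 100000 in
theorem pvTransT_length : pvTransT.length = 128 := by decide

set_option maxRecDepth 100000 in
theorem pvStep_eq (sc : List Int) : pvStepA sc = pvStepB sc := by
  rw [pvStepB_eq_map]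
  apply List.ext_getElem
  · simp [pvStepA_length, pvTransT_length]
  · intro j h1 h2
    have hj : j < 128 := by simpa [pvStepA_length] using h1
    have hjT : j < pvTransT.length := by rw [pvTransT_length]; exact hj
    rw [← List.getD_eq_getElem (pvStepA sc) 0 h1, ← List.getD_eq_getElem _ 0 h2]
    rw [pvStepA_getD sc j hj]
    rw [List.getD_eq_getElem?_getD, List.getElem?_map, List.getElem?_eq_getElem hjT]
    simp only [Option.map_some, Option.getD_some]
    have e : pvTransT.getD j [] = pvTransT[j] := List.getD_eq_getElem pvTransT [] hjT
    rw [← e, ← pvFilters_eq j (by simp [hj]), List.foldl_map]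
    simp only [Int.ofNat_eq_natCast, PySem.List.pyGetD_natCast]

theorem build_symbolic_map_spec : Claim_equal_build_symbolic_map := by
  intro steps _
  unfold Spec_build_symbolic_map build_symbolic_map build_symbolic_map_alt
  have : (fun (st : List (List Int) × List Int) (_ : Int) => (st.1 ++ [st.2], pvStepA st.2)) =
      (fun (st : List (List Int) × List Int) (_ : Int) => (st.1 ++ [st.2], pvStepB st.2)) := by
    funext st x
    rw [pvStep_eq]
  rw [this]
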